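-- pv_equiv track=rewrite | github.com/shiyutang/DL-Prep | 04_Algorithms/Leetcode/L914. X of a Kind in a Deck of Cards.py | hasGroupsSizeX
-- ===== SOURCE A (Python) =====
-- from collections import Counter
-- from math import gcd
-- from collections import Counter
-- from math import gcd
--
-- def hasGroupsSizeX(deck: list) -> bool:
--     record = Counter(deck)
--     init = -1
--     for ele in set(record.values()):
--         init = [init, ele][init == -1]
--         if gcd(ele, init) < 2:
--             return False
--
--     return True
-- ===== SOURCE B (Python) =====
-- from collections import Counter
--
--
-- def hasGroupsSizeX(deck: list) -> bool:
--     # Trial-division search over the possible group size X instead of gcd logic.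
--     counts = list(Counter(deck).values())
--     if not counts:
--         return True
--     m = min(counts)
--     for X in range(2, m + 1):
--         if all(c % X == 0 for c in counts):
--             return True
--     return False
-- ===== Notes on version B (the rewrite author's own statement) =====
-- stated objective: alternative
-- what changed: B replaces A's gcd test over set(values) (which keeps gcd-ing each count against the FIRST count only) by a direct trial-division search for a group size X in 2..min(counts) dividing every count, i.e. B answers the actual LeetCode question gcd(counts) >= 2.
-- intended difference: On decks whose distinct frequency counts are pairwise non-coprime yet have overall gcd 1 (e.g. counts {6,10,15}), A compares every count only against the first one and returns True, while B returns False, which is the intended answer since no group size X>=2 divides all counts. — e.g. on hasGroupsSizeX([1, 1, 1, 1, 1, 1, 2, 2, 2, 2, 2, 2, 2, 2, 2, 2, 3, 3, 3, 3, 3, 3, 3, 3, 3, 3, 3, 3, 3, 3, 3]): A returns true, B returns false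
-- outside the precondition, e.g. on hasGroupsSizeX([3, 3, 3, 3, 3, 3, 2, 2, 2, 1, 1]): A returns False, B returns False
import Mathlib
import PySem

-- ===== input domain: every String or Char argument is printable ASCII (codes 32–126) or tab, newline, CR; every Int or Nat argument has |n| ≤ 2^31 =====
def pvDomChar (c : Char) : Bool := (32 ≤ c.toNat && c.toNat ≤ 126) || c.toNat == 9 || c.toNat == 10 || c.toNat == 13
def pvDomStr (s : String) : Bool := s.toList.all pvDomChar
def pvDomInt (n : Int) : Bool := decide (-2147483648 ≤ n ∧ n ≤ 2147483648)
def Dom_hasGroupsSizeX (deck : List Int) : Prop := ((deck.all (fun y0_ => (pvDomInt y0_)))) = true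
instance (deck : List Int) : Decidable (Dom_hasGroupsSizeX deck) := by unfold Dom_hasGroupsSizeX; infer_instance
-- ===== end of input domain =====

-- B answers the real question (is there an X ≥ 2 dividing all frequency counts) by trial
-- division over 2..min(counts); A keeps gcd-ing each count against the first one only.
-- Pre_ excludes decks whose A-result depends on Python's set iteration order (see Pre_).

-- ===== PORT A =====
-- the 'for ele in set(record.values())' loop with its early return and the init update
def pvLoopA : List Int → Int → Bool
  | [], _ => true
  | ele :: rest, init =>
      let init' := if init == -1 then ele else init
      if Int.gcd ele init' < 2 then false
      else pvLoopA rest init'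

def hasGroupsSizeX (deck : List Int) : Bool :=
  pvLoopA (PySem.Set.ofList (PySem.Dict.counter deck).values) (-1)

-- ===== PORT B =====
-- 'for X in range(2, m+1): if all(c % X == 0 for c in counts): return True'
def pvLoopB (counts : List Int) : List Int → Bool
  | [] => false
  | X :: rest =>
      if counts.all (fun c => PySem.Int.mod c X == 0) then true
      else pvLoopB counts rest

def hasGroupsSizeX_alt (deck : List Int) : Bool :=
  let counts := (PySem.Dict.counter deck).values
  match PySem.List.min? counts (fun x => x) with
  | none => true
  | some m => pvLoopB counts (PySem.List.pyRange 2 (m + 1) 1)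

-- ===== PRECONDITION & SPEC =====
-- the multiset of frequency counts of the deck (first-occurrence order)
def pvFreqs (deck : List Int) : List Int :=
  (PySem.List.dedup deck).map (fun x => ((deck.count x : Nat) : Int))

-- Pre_ excludes decks whose verdict under A depends on WHICH count Python's set iteration
-- yields first (some counts pass the pairwise-gcd test as 'init', others fail): A's value
-- there is an accident of CPython's set hash order and cannot be ported deterministically.
def Pre_hasGroupsSizeX (deck : List Int) : Prop :=
  (∀ f ∈ pvFreqs deck, ∀ e ∈ pvFreqs deck, 2 ≤ Int.gcd e f) ∨
  (∀ f ∈ pvFreqs deck, ∃ e ∈ pvFreqs deck, Int.gcd e f < 2)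
instance (deck : List Int) : Decidable (Pre_hasGroupsSizeX deck) := by
  unfold Pre_hasGroupsSizeX; infer_instance

def pvWitness_hasGroupsSizeX : List Int := [1, 1, 2, 2]

-- On decks whose distinct counts are pairwise non-coprime yet have overall gcd 1
-- (e.g. counts {6,10,15}), A compares every count only against the first one and returns
-- True, while B returns False — the intended answer: no X ≥ 2 divides all counts.
def D_hasGroupsSizeX (deck : List Int) : Prop :=
  deck ≠ [] ∧
  (∀ f ∈ pvFreqs deck, ∀ e ∈ pvFreqs deck, 2 ≤ Int.gcd e f) ∧
  (pvFreqs deck).foldr (fun e g => Nat.gcd e.natAbs g) 0 = 1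
instance (deck : List Int) : Decidable (D_hasGroupsSizeX deck) := by
  unfold D_hasGroupsSizeX; infer_instance

def Spec_hasGroupsSizeX (deck : List Int) (out : Bool) : Prop :=
  ¬ D_hasGroupsSizeX deck → out = hasGroupsSizeX_alt deck
instance (deck : List Int) (out : Bool) : Decidable (Spec_hasGroupsSizeX deck out) := by
  unfold Spec_hasGroupsSizeX; infer_instance

def pvDiffWitness_hasGroupsSizeX : List Int :=
  [1, 1, 1, 1, 1, 1, 2, 2, 2, 2, 2, 2, 2, 2, 2, 2,
   3, 3, 3, 3, 3, 3, 3, 3, 3, 3, 3, 3, 3, 3, 3]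
def pvDiffWitnessOut_hasGroupsSizeX : Bool × Bool := (true, false)

-- ===== CLAIM (what is proved, stated in full; the proofs are below) =====
def Claim_unchanged_hasGroupsSizeX : Prop :=
  ∀ (deck : List Int), Dom_hasGroupsSizeX deck → Pre_hasGroupsSizeX deck →
    Spec_hasGroupsSizeX deck (hasGroupsSizeX deck)
def Claim_changed_hasGroupsSizeX : Prop :=
  Dom_hasGroupsSizeX (pvDiffWitness_hasGroupsSizeX) ∧
  Pre_hasGroupsSizeX (pvDiffWitness_hasGroupsSizeX) ∧
  D_hasGroupsSizeX (pvDiffWitness_hasGroupsSizeX) ∧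
  hasGroupsSizeX (pvDiffWitness_hasGroupsSizeX) = pvDiffWitnessOut_hasGroupsSizeX.1 ∧
  hasGroupsSizeX_alt (pvDiffWitness_hasGroupsSizeX) = pvDiffWitnessOut_hasGroupsSizeX.2 ∧
  pvDiffWitnessOut_hasGroupsSizeX.1 ≠ pvDiffWitnessOut_hasGroupsSizeX.2
def Claim_exact_hasGroupsSizeX : Prop :=
  ∀ (deck : List Int), Dom_hasGroupsSizeX deck → Pre_hasGroupsSizeX deck →
    D_hasGroupsSizeX deck → hasGroupsSizeX deck ≠ hasGroupsSizeX_alt deck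

-- ===== LEMMAS AND PROOFS =====
-- the values of Counter(deck) are exactly pvFreqs deck
lemma values_counter_eq (deck : List Int) :
    (PySem.Dict.counter deck).values = pvFreqs deck := by
  simp [PySem.Dict.values, PySem.Dict.items_counter, pvFreqs, List.map_map]

-- every frequency count is positive
lemma pvFreqs_pos (deck : List Int) : ∀ c ∈ pvFreqs deck, 1 ≤ c := by
  intro c hc
  simp [pvFreqs] at hc
  obtain ⟨x, hx, rfl⟩ := hc
  have := List.count_pos_iff.mpr hx
  omega

lemma ofList_eq_nil_iff (l : List Int) : PySem.Set.ofList l = [] ↔ l = [] := by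
  constructor
  · intro h
    cases l with
    | nil => rfl
    | cons x t =>
      have : x ∈ PySem.Set.ofList (x :: t) :=
        (PySem.Set.mem_ofList _ x).mpr (List.mem_cons_self ..)
      simp [h] at this
  · rintro rfl; rfl

lemma pvFreqs_eq_nil_iff (deck : List Int) : pvFreqs deck = [] ↔ deck = [] := by
  rw [pvFreqs, List.map_eq_nil_iff, PySem.List.dedup_eq_ofList, ofList_eq_nil_iff]

-- A's loop once init is set (init ≠ -1): it checks every remaining element against init
lemma pvLoopA_ne (l : List Int) (init : Int) (h : init ≠ -1) :
    pvLoopA l init = decide (∀ e ∈ l, 2 ≤ Int.gcd e init) := by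
  induction l with
  | nil => simp [pvLoopA]
  | cons e r ih =>
    simp only [pvLoopA, beq_iff_eq, if_neg h]
    by_cases hg : Int.gcd e init < 2
    · simp only [if_pos hg]
      symm
      rw [decide_eq_false_iff_not]
      intro ha
      have := ha e (by simp)
      omega
    · simp only [if_neg hg, ih]
      simp only [List.mem_cons, decide_eq_decide]
      constructor
      · rintro ha e' (rfl | he')
        · omega
        · exact ha e' he'
      · intro ha e' he'; exact ha e' (Or.inr he')

-- A's result is the pairwise-gcd verdict against SOME frequency count (the first one)
lemma portA_eq (deck : List Int) (hd : deck ≠ []) :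
    ∃ f ∈ pvFreqs deck,
      hasGroupsSizeX deck = decide (∀ e ∈ pvFreqs deck, 2 ≤ Int.gcd e f) := by
  have hC : pvFreqs deck ≠ [] := fun h => hd ((pvFreqs_eq_nil_iff deck).mp h)
  have hV : PySem.Set.ofList (pvFreqs deck) ≠ [] := by
    intro h
    exact hC ((ofList_eq_nil_iff _).mp (by
      have := (PySem.Set.mem_ofList (pvFreqs deck) ·)
      exact h))
  obtain ⟨f, rest, hfr⟩ := List.exists_cons_of_ne_nil hV
  have hfV : f ∈ PySem.Set.ofList (pvFreqs deck) := by rw [hfr]; simp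
  have hfC : f ∈ pvFreqs deck := (PySem.Set.mem_ofList _ f).mp hfV
  have hf1 : 1 ≤ f := pvFreqs_pos deck f hfC
  refine ⟨f, hfC, ?_⟩
  have hmem : ∀ e : Int, e ∈ PySem.Set.ofList (pvFreqs deck) ↔ e ∈ pvFreqs deck :=
    fun e => PySem.Set.mem_ofList _ e
  unfold hasGroupsSizeX
  rw [values_counter_eq, hfr]
  simp only [pvLoopA, beq_self_eq_true, if_true]
  by_cases hg : Int.gcd f f < 2
  · simp only [if_pos hg]
    symm
    rw [decide_eq_false_iff_not]
    intro ha
    have := ha f hfC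
    omega
  · simp only [if_neg hg, pvLoopA_ne rest f (by omega)]
    rw [decide_eq_decide]
    constructor
    · intro ha e he
      have heV : e ∈ PySem.Set.ofList (pvFreqs deck) := (hmem e).mpr he
      rw [hfr] at heV
      rcases List.mem_cons.mp heV with rfl | her
      · omega
      · exact ha e her
    · intro ha e her
      exact ha e ((hmem e).mp (by rw [hfr]; exact List.mem_cons_of_mem _ her))

-- B's loop: true iff some X in the candidate list divides all counts
lemma pvLoopB_eq (counts l : List Int) :
    pvLoopB counts l = decide (∃ X ∈ l, ∀ c ∈ counts, PySem.Int.mod c X = 0) := by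
  induction l with
  | nil => simp [pvLoopB]
  | cons X rest ih =>
    simp only [pvLoopB]
    by_cases hX : counts.all (fun c => PySem.Int.mod c X == 0) = true
    · simp only [if_pos hX]
      symm
      rw [decide_eq_true_iff]
      exact ⟨X, by simp, by simpa using hX⟩
    · simp only [if_neg hX, ih, List.mem_cons, decide_eq_decide]
      simp only [List.all_eq_true, beq_iff_eq] at hX
      push Not at hX
      constructor
      · rintro ⟨X', hm, hall⟩; exact ⟨X', Or.inr hm, hall⟩
      · rintro ⟨X', (rfl | hm), hall⟩
        · obtain ⟨c, hc, hne⟩ := hX; exact absurd (hall c hc) hne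
        · exact ⟨X', hm, hall⟩

-- B's result: true iff some X ≥ 2 divides every frequency count
lemma portB_true_iff (deck : List Int) (hd : deck ≠ []) :
    hasGroupsSizeX_alt deck = true ↔ ∃ X : Int, 2 ≤ X ∧ ∀ c ∈ pvFreqs deck, X ∣ c := by
  have hC : pvFreqs deck ≠ [] := fun h => hd ((pvFreqs_eq_nil_iff deck).mp h)
  have hne : PySem.List.min? (pvFreqs deck) (fun x => x) ≠ none := by
    intro h
    exact hC ((PySem.List.min?_eq_none_iff _ _).mp h)
  obtain ⟨m, hm⟩ := Option.ne_none_iff_exists'.mp hne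
  unfold hasGroupsSizeX_alt
  rw [values_counter_eq]
  simp only [hm]
  · have hmC : m ∈ pvFreqs deck := PySem.List.min?_mem hm
    have hm1 : 1 ≤ m := pvFreqs_pos deck m hmC
    simp only [pvLoopB_eq, decide_eq_true_iff]
    constructor
    · rintro ⟨X, hXr, hdiv⟩
      have hXb := (PySem.List.mem_pyRange_one).mp hXr
      exact ⟨X, hXb.1, fun c hc =>
        (PySem.Int.mod_eq_zero_iff_dvd c X).mp (hdiv c hc)⟩
    · rintro ⟨X, hX2, hdiv⟩
      have hXm : X ≤ m := Int.le_of_dvd (by omega) (hdiv m hmC)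
      refine ⟨X, (PySem.List.mem_pyRange_one).mpr ⟨by omega, by omega⟩, fun c hc => ?_⟩
      exact (PySem.Int.mod_eq_zero_iff_dvd c X).mpr (hdiv c hc)

-- the folded gcd divides every element
lemma pvGcd_dvd (l : List Int) :
    ∀ c ∈ l, (l.foldr (fun e g => Nat.gcd e.natAbs g) 0) ∣ c.natAbs := by
  induction l with
  | nil => simp
  | cons e r ih =>
    intro c hc
    rcases List.mem_cons.mp hc with rfl | hc
    · exact Nat.gcd_dvd_left _ _
    · exact (Nat.gcd_dvd_right _ _).trans (ih c hc)

-- any common divisor divides the folded gcd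
lemma dvd_pvGcd (l : List Int) (d : Nat) (h : ∀ c ∈ l, d ∣ c.natAbs) :
    d ∣ l.foldr (fun e g => Nat.gcd e.natAbs g) 0 := by
  induction l with
  | nil => simp
  | cons e r ih =>
    exact Nat.dvd_gcd (h e (by simp)) (ih (fun c hc => h c (List.mem_cons_of_mem _ hc)))

-- under the pairwise hypothesis with folded gcd ≠ 1, B finds X = the gcd
lemma portB_true_of_gcd_ne_one (deck : List Int) (hd : deck ≠ [])
    (hg : (pvFreqs deck).foldr (fun e g => Nat.gcd e.natAbs g) 0 ≠ 1) :
    hasGroupsSizeX_alt deck = true := by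
  have hC : pvFreqs deck ≠ [] := fun h => hd ((pvFreqs_eq_nil_iff deck).mp h)
  obtain ⟨m, rest, hmr⟩ := List.exists_cons_of_ne_nil hC
  have hmC : m ∈ pvFreqs deck := by rw [hmr]; simp
  have hm1 : 1 ≤ m := pvFreqs_pos deck m hmC
  set g := (pvFreqs deck).foldr (fun e g => Nat.gcd e.natAbs g) 0 with hgdef
  have hgm : g ∣ m.natAbs := pvGcd_dvd _ m hmC
  have hg0 : g ≠ 0 := by
    intro h0
    rw [h0] at hgm
    have := Nat.eq_zero_of_zero_dvd hgm
    omega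
  have hg2 : 2 ≤ g := by omega
  rw [portB_true_iff deck hd]
  refine ⟨(g : Int), by exact_mod_cast hg2, fun c hc => ?_⟩
  have hc1 : 1 ≤ c := pvFreqs_pos deck c hc
  have : (g : Int) ∣ (c.natAbs : Int) := Int.natCast_dvd_natCast.mpr (pvGcd_dvd _ c hc)
  rwa [Int.natAbs_of_nonneg (by omega)] at this

-- ===== VERDICT (by name: the statement is the Claim_ definition above) =====
theorem hasGroupsSizeX_spec : Claim_unchanged_hasGroupsSizeX := by
  intro deck _ hPre
  unfold Spec_hasGroupsSizeX
  intro hnD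
  by_cases hd : deck = []
  · subst hd; decide
  · obtain ⟨f, hfC, hA⟩ := portA_eq deck hd
    rcases hPre with hall | hex
    · have hgne : (pvFreqs deck).foldr (fun e g => Nat.gcd e.natAbs g) 0 ≠ 1 := by
        intro h1
        exact hnD ⟨hd, hall, h1⟩
      rw [hA, portB_true_of_gcd_ne_one deck hd hgne, decide_eq_true_iff]
      exact fun e he => hall f hfC e he
    · obtain ⟨e, heC, hlt⟩ := hex f hfC
      rw [hA]
      have hAfalse : decide (∀ e ∈ pvFreqs deck, 2 ≤ Int.gcd e f) = false := by
        rw [decide_eq_false_iff_not]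
        intro ha
        have := ha e heC
        omega
      rw [hAfalse]
      symm
      rw [← Bool.not_eq_true, portB_true_iff deck hd]
      rintro ⟨X, hX2, hdiv⟩
      have hXg : X ∣ (Int.gcd e f : Int) := Int.dvd_coe_gcd (hdiv e heC) (hdiv f hfC)
      have he1 : 1 ≤ e := pvFreqs_pos deck e heC
      have hgcd0 : Int.gcd e f ≠ 0 := by
        intro h0
        have : e = 0 := by
          have := Int.gcd_eq_zero_iff.mp h0
          exact this.1
        omega
      have hgcd1 : (Int.gcd e f : Int) = 1 := by
        have : (1:Nat) ≤ Int.gcd e f := by omega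
        have h2 : Int.gcd e f < 2 := hlt
        have : Int.gcd e f = 1 := by omega
        exact_mod_cast this
      rw [hgcd1] at hXg
      have := Int.le_of_dvd (by omega) hXg
      omega

theorem hasGroupsSizeX_changed : Claim_changed_hasGroupsSizeX := by
  unfold Claim_changed_hasGroupsSizeX; decide

theorem hasGroupsSizeX_tight : Claim_exact_hasGroupsSizeX := by
  intro deck _ _ hD
  obtain ⟨hd, hall, hg1⟩ := hD
  obtain ⟨f, hfC, hA⟩ := portA_eq deck hd
  have hAtrue : hasGroupsSizeX deck = true := by
    rw [hA, decide_eq_true_iff]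
    exact fun e he => hall f hfC e he
  have hBfalse : hasGroupsSizeX_alt deck ≠ true := by
    intro hB
    obtain ⟨X, hX2, hdiv⟩ := (portB_true_iff deck hd).mp hB
    have hXd : X.toNat ∣ (pvFreqs deck).foldr (fun e g => Nat.gcd e.natAbs g) 0 := by
      apply dvd_pvGcd
      intro c hc
      have hc1 : 1 ≤ c := pvFreqs_pos deck c hc
      have hXc : (X.toNat : Int) ∣ c := by
        rw [Int.toNat_of_nonneg (by omega)]
        exact hdiv c hc
      have : (X.toNat : Int) ∣ (c.natAbs : Int) := by
        rwa [Int.natAbs_of_nonneg (by omega)]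
      exact_mod_cast this
    rw [hg1] at hXd
    have := Nat.le_of_dvd (by omega) hXd
    omega
  rw [hAtrue]
  exact fun h => hBfalse h.symm
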